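-- pv_equiv track=rewrite | github.com/felimikli/sintaxis_tp1 | lexer.py | afd_operador_relacional
-- ===== SOURCE A (Python) =====
-- ESTADO_FINAL = "ESTADO FINAL"
--
-- ESTADO_NO_FINAL = "ESTADO NO FINAL"
--
-- ESTADO_TRAMPA = "ESTADO TRAMPA"
--
-- def afd_operador_relacional(lexema):
--         estado = 0
--         estados_finales = [1, 3, 4]
--
--         funcion_estados = [
--             {'<': 1, '=': 2, '>': 3},
--             {'=': 4, '>': 4},
--             {'=': 4},
--             {'=': 4},
--             {}]
--
--         for char in lexema:
--                 transicion = funcion_estados[estado]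
--                 if char in transicion:
--                         estado = transicion[char]
--                 else:
--                         return ESTADO_TRAMPA
--
--         if estado in estados_finales:
--                 return ESTADO_FINAL
--         else:
--                 return ESTADO_NO_FINAL
-- ===== SOURCE B (Python) =====
-- ESTADO_FINAL = "ESTADO FINAL"
--
-- ESTADO_NO_FINAL = "ESTADO NO FINAL"
--
-- ESTADO_TRAMPA = "ESTADO TRAMPA"
--
-- # The accepted language is finite: enumerate it instead of walking the automaton.
-- FINALES = (['<'], ['>'], ['<', '='], ['<', '>'], ['=', '='], ['>', '='])
-- NO_FINALES = ([], ['='])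
--
-- def afd_operador_relacional(lexema):
--         cs = [char for char in lexema]
--         if cs in FINALES:
--                 return ESTADO_FINAL
--         if cs in NO_FINALES:
--                 return ESTADO_NO_FINAL
--         return ESTADO_TRAMPA
-- ===== Notes on version B (the rewrite author's own statement) =====
-- stated objective: simpler
-- what changed: Replaces the state-transition loop over the DFA's dictionary table by a direct enumeration of the finite accepted language: the characters are collected once and compared against the six final and two non-final sequences.
import Mathlib
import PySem

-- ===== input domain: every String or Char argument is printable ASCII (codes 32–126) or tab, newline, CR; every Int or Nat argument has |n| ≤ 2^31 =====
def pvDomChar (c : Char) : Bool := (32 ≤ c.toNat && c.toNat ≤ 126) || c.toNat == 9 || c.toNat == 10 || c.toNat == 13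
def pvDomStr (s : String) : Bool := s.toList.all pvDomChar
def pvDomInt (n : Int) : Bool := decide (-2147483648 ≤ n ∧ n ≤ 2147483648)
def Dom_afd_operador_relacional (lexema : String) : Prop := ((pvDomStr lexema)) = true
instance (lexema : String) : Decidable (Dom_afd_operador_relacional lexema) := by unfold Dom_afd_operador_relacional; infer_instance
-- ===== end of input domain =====

-- B replaces the DFA transition-table walk by direct enumeration of the finite accepted language (objective: simpler).


-- ===== PORT A =====
def pvEstadoFinal : String := "ESTADO FINAL"
def pvEstadoNoFinal : String := "ESTADO NO FINAL"
def pvEstadoTrampa : String := "ESTADO TRAMPA"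

def pvFuncionEstados : List (PySem.Dict Char Int) :=
  [ PySem.Dict.mk [('<', 1), ('=', 2), ('>', 3)],
    PySem.Dict.mk [('=', 4), ('>', 4)],
    PySem.Dict.mk [('=', 4)],
    PySem.Dict.mk [('=', 4)],
    PySem.Dict.mk [] ]

-- the for-loop with its early return, as structural recursion over the characters
def pvAfdGo : List Char → Int → String
  | [], estado => if estado = 1 ∨ estado = 3 ∨ estado = 4 then pvEstadoFinal else pvEstadoNoFinal
  | c :: rest, estado =>
      match PySem.List.pyGet? pvFuncionEstados estado with
      | none => pvEstadoTrampa   -- unreachable totality guard: estado is always 0..4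
      | some transicion =>
          match PySem.Dict.get? transicion c with
          | some s => pvAfdGo rest s
          | none => pvEstadoTrampa

def afd_operador_relacional (lexema : String) : String := pvAfdGo lexema.toList 0

-- ===== PORT B =====
-- Source B collects the characters once and compares them to the finite accepted language
-- (Python string equality ported exactly via character lists)
def afd_operador_relacional_alt (lexema : String) : String :=
  let cs := lexema.toList
  if cs ∈ [['<'], ['>'], ['<', '='], ['<', '>'], ['=', '='], ['>', '=']] then pvEstadoFinal
  else if cs ∈ [([] : List Char), ['=']] then pvEstadoNoFinal
  else pvEstadoTrampa

-- ===== PRECONDITION & SPEC =====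
def Spec_afd_operador_relacional (lexema : String) (out : String) : Prop := out = afd_operador_relacional_alt lexema
instance (lexema : String) (out : String) : Decidable (Spec_afd_operador_relacional lexema out) := by unfold Spec_afd_operador_relacional; infer_instance

-- ===== CLAIM (what is proved, stated in full; the proofs are below) =====
def Claim_equal_afd_operador_relacional : Prop := ∀ (lexema : String), Dom_afd_operador_relacional lexema → Spec_afd_operador_relacional lexema (afd_operador_relacional lexema)

-- ===== LEMMAS AND PROOFS =====

-- state 4 has no outgoing transitions
lemma pvAfdGo_four : ∀ (cs : List Char), pvAfdGo cs 4 = if cs = [] then pvEstadoFinal else pvEstadoTrampa := by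
  intro cs
  cases cs with
  | nil => simp [pvAfdGo]
  | cons c r =>
    simp only [pvAfdGo, pvFuncionEstados]
    simp [PySem.List.pyGet?, PySem.List.pyIdx?, PySem.Dict.get?_mk_cons, PySem.Dict.get?, List.find?, beq_iff_eq]

lemma pvAfdGo_main : ∀ (cs : List Char), pvAfdGo cs 0 =
    (if cs ∈ [['<'], ['>'], ['<', '='], ['<', '>'], ['=', '='], ['>', '=']] then pvEstadoFinal
     else if cs ∈ [([] : List Char), ['=']] then pvEstadoNoFinal
     else pvEstadoTrampa) := by
  intro cs
  cases cs with
  | nil => simp [pvAfdGo]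
  | cons c r =>
    by_cases h1 : c = '<'
    · subst h1
      cases r with
      | nil => simp [pvAfdGo, pvFuncionEstados, PySem.List.pyGet?, PySem.List.pyIdx?, PySem.Dict.get?_mk_cons, PySem.Dict.get?, List.find?, beq_iff_eq, pvAfdGo_four]
      | cons d r2 =>
        by_cases h2 : d = '='
        · subst h2
          simp [pvAfdGo, pvFuncionEstados, PySem.List.pyGet?, PySem.List.pyIdx?, PySem.Dict.get?_mk_cons, PySem.Dict.get?, List.find?, beq_iff_eq, pvAfdGo_four]
        · by_cases h3 : d = '>'
          · subst h3
            simp [pvAfdGo, pvFuncionEstados, PySem.List.pyGet?, PySem.List.pyIdx?, PySem.Dict.get?_mk_cons, PySem.Dict.get?, List.find?, beq_iff_eq, pvAfdGo_four]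
          · simp [pvAfdGo, pvFuncionEstados, PySem.List.pyGet?, PySem.List.pyIdx?, PySem.Dict.get?_mk_cons, PySem.Dict.get?, List.find?, beq_iff_eq, pvAfdGo_four, beq_eq_false_iff_ne.mpr (Ne.symm h2), beq_eq_false_iff_ne.mpr (Ne.symm h3), h2, h3]
    · by_cases h2 : c = '='
      · subst h2
        cases r with
        | nil => simp [pvAfdGo, pvFuncionEstados, PySem.List.pyGet?, PySem.List.pyIdx?, PySem.Dict.get?_mk_cons, PySem.Dict.get?, List.find?, beq_iff_eq, pvAfdGo_four]
        | cons d r2 =>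
          by_cases h3 : d = '='
          · subst h3
            simp [pvAfdGo, pvFuncionEstados, PySem.List.pyGet?, PySem.List.pyIdx?, PySem.Dict.get?_mk_cons, PySem.Dict.get?, List.find?, beq_iff_eq, pvAfdGo_four]
          · simp [pvAfdGo, pvFuncionEstados, PySem.List.pyGet?, PySem.List.pyIdx?, PySem.Dict.get?_mk_cons, PySem.Dict.get?, List.find?, beq_iff_eq, pvAfdGo_four, beq_eq_false_iff_ne.mpr (Ne.symm h3), h3]
      · by_cases h3 : c = '>'
        · subst h3
          cases r with
          | nil => simp [pvAfdGo, pvFuncionEstados, PySem.List.pyGet?, PySem.List.pyIdx?, PySem.Dict.get?_mk_cons, PySem.Dict.get?, List.find?, beq_iff_eq, pvAfdGo_four]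
          | cons d r2 =>
            by_cases h4 : d = '='
            · subst h4
              simp [pvAfdGo, pvFuncionEstados, PySem.List.pyGet?, PySem.List.pyIdx?, PySem.Dict.get?_mk_cons, PySem.Dict.get?, List.find?, beq_iff_eq, pvAfdGo_four]
            · simp [pvAfdGo, pvFuncionEstados, PySem.List.pyGet?, PySem.List.pyIdx?, PySem.Dict.get?_mk_cons, PySem.Dict.get?, List.find?, beq_iff_eq, pvAfdGo_four, beq_eq_false_iff_ne.mpr (Ne.symm h4), h4]
        · simp [pvAfdGo, pvFuncionEstados, PySem.List.pyGet?, PySem.List.pyIdx?, PySem.Dict.get?_mk_cons, PySem.Dict.get?, List.find?, beq_iff_eq, pvAfdGo_four, beq_eq_false_iff_ne.mpr (Ne.symm h1), beq_eq_false_iff_ne.mpr (Ne.symm h2), beq_eq_false_iff_ne.mpr (Ne.symm h3), h1, h2, h3]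

-- ===== VERDICT (by name: the statement is the Claim_ definition above) =====
theorem afd_operador_relacional_spec : Claim_equal_afd_operador_relacional := by
  intro lexema _
  unfold Spec_afd_operador_relacional afd_operador_relacional afd_operador_relacional_alt
  exact pvAfdGo_main lexema.toList
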